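-- pv_equiv track=rewrite | github.com/TanMosheng/Condition-identification | recognition.py | correct_results
-- ===== SOURCE A (Python) =====
-- def correct_results(results, length):
--     for d in range(0, len(results)):
--         if 0 <= d < length:
--             results[d] = results[length]
--         elif results[d] != 0:
--             continue
--         else:
--             left = results[d - 1]
--             flag = len(results)
--             right = -1
--             for i in range(d + 1, len(results)):
--                 if results[i] != 0:
--                     right = results[i]
--                     flag = i
--                     break
--             if flag != len(results):
--                 if left == right:
--                     for i in range(d, flag):
--                         results[i] = left
--                 else:
--                     for i in range(d, flag):
--                         results[i] = right
--             else:
--                 for i in range(d, flag):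
--                     results[i] = left
--     return results
-- ===== SOURCE B (Python) =====
-- def correct_results(results, length):
--     n = len(results)
--     if n == 0:
--         return results
--     if length > 0:
--         v = results[length]
--         for d in range(length):
--             results[d] = v
--         start = length
--     else:
--         start = 0
--     # backward pass over the suffix: each zero takes the nearest nonzero to its right
--     filled = []
--     right = 0
--     for x in reversed(results[start:]):
--         if x != 0:
--             right = x
--         filled.append(right)
--     filled.reverse()
--     # forward pass: any position still zero takes the value on its left
--     prev = results[start - 1]
--     for i, x in enumerate(filled):
--         if x == 0:
--             filled[i] = prev
--         else:
--             prev = x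
--     results[start:] = filled
--     return results
-- ===== Notes on version B (the rewrite author's own statement) =====
-- stated objective: simpler
-- what changed: A rescans rightward from every zero and refills whole runs inside one index loop; B does the prefix overwrite, then one backward pass assigning each zero the nearest nonzero to its right, then one forward pass filling still-zero positions from the left, dropping the redundant left==right branch.
-- outside the precondition, e.g. on correct_results([1, 2], 2): A raises IndexError, B raises IndexError; on correct_results([5], 3): A raises IndexError, B raises IndexError
import Mathlib
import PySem

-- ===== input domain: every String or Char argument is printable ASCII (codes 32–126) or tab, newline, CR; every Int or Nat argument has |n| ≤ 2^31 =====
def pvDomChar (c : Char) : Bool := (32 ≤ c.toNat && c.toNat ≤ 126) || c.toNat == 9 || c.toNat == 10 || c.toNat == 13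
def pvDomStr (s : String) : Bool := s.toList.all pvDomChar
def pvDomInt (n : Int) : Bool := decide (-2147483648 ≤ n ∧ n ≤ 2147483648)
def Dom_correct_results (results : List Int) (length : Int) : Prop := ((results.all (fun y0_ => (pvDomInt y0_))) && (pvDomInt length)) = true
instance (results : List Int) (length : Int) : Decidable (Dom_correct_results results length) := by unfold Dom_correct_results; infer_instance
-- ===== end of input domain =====

-- B replaces A's per-zero rightward rescans by one backward pass (nearest nonzero to the
-- right) and one forward pass (left value for trailing zeros): simpler, single-purpose loops.
-- Both A and B mutate `results` in place in Python; the equivalence proved here is about the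
-- return value.

-- ===== PORT A =====
-- for i in range(a, b): results[i] = v
def pvFill (rs : List Int) (a b v : Int) : List Int :=
  (PySem.List.pyRange a b 1).foldl (fun acc i => PySem.List.pySetD acc i v) rs

-- the inner scan: right = -1; flag = len; for i in range(d+1, len): if rs[i] != 0: right, flag = rs[i], i; break
def pvAFindRight (rs : List Int) (d : Int) : Int × Int :=
  match (PySem.List.pyRange (d + 1) (rs.length : Int) 1).find?
      (fun i => PySem.List.pyGetD rs i 0 != 0) with
  | some i => (PySem.List.pyGetD rs i 0, i)
  | none => (-1, (rs.length : Int))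

-- one iteration of A's outer loop at index d
def pvAStep (length : Int) (rs : List Int) (d : Int) : List Int :=
  if 0 ≤ d ∧ d < length then
    PySem.List.pySetD rs d (PySem.List.pyGetD rs length 0)
  else if PySem.List.pyGetD rs d 0 ≠ 0 then rs
  else
    let left := PySem.List.pyGetD rs (d - 1) 0
    let rf := pvAFindRight rs d
    if rf.2 ≠ (rs.length : Int) then
      if left = rf.1 then pvFill rs d rf.2 left else pvFill rs d rf.2 rf.1
    else pvFill rs d rf.2 left

def correct_results (results : List Int) (length : Int) : List Int :=
  (PySem.List.pyRange 0 (results.length : Int) 1).foldl (pvAStep length) results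

-- ===== PORT B =====
def correct_results_alt (results : List Int) (length : Int) : List Int :=
  if results.length = 0 then results
  else
    -- prefix overwrite and start, as in Source B
    let p :=
      if length > 0 then
        let v := PySem.List.pyGetD results length 0
        ((PySem.List.pyRange 0 length 1).foldl
            (fun acc d => PySem.List.pySetD acc d v) results, length)
      else (results, (0 : Int))
    let rs := p.1
    let start := p.2
    -- backward pass: for x in reversed(results[start:]): right = x if x != 0 else right; filled.append(right)
    let suffix := PySem.List.slice rs (some start) none
    let bp := suffix.reverse.foldl
        (fun (q : Int × List Int) x =>
          let r := if x ≠ 0 then x else q.1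
          (r, q.2 ++ [r])) (0, [])
    let filled := bp.2.reverse
    -- forward pass: prev = results[start-1]; fill remaining zeros with prev
    let prev := PySem.List.pyGetD rs (start - 1) 0
    let fp := filled.foldl
        (fun (q : Int × List Int) x =>
          if x = 0 then (q.1, q.2 ++ [q.1]) else (x, q.2 ++ [x])) (prev, [])
    PySem.List.slice rs none (some start) ++ fp.2

-- ===== PRECONDITION & SPEC =====
-- Pre_ excludes exactly the inputs where A raises IndexError: a nonempty list with
-- length ≥ len(results) and length > 0 makes A (and B) evaluate results[length].
def Pre_correct_results (results : List Int) (length : Int) : Prop :=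
  results = [] ∨ length < (results.length : Int)
instance (results : List Int) (length : Int) : Decidable (Pre_correct_results results length) := by
  unfold Pre_correct_results; infer_instance

def pvWitness_correct_results : List Int × Int := ([0, 1, 0], 1)

def Spec_correct_results (results : List Int) (length : Int) (out : List Int) : Prop :=
  out = correct_results_alt results length
instance (results : List Int) (length : Int) (out : List Int) : Decidable (Spec_correct_results results length out) := by
  unfold Spec_correct_results; infer_instance

-- ===== CLAIM (what is proved, stated in full; the proofs are below) =====
def Claim_equal_correct_results : Prop := ∀ (results : List Int) (length : Int), Dom_correct_results results length → Pre_correct_results results length → Spec_correct_results results length (correct_results results length)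

-- ===== LEMMAS AND PROOFS =====

-- Structural descriptions of the two computations, used only by the proofs.

-- nearest-nonzero-to-the-right pass, structurally (B's backward loop)
def pvBack (r0 : Int) : List Int → Int × List Int
  | [] => (r0, [])
  | x :: t =>
    let p := pvBack r0 t
    if x ≠ 0 then (x, x :: p.2) else (p.1, p.1 :: p.2)

-- left-fill pass, structurally (B's forward loop)
def pvFwd (prev : Int) : List Int → List Int
  | [] => []
  | x :: t => if x = 0 then prev :: pvFwd prev t else x :: pvFwd x t

-- what A's main loop does to the suffix, as a recursion on zero-runs
def pvAFill (lv : Int) (s : List Int) : List Int :=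
  match s with
  | [] => []
  | x :: t =>
    if x ≠ 0 then x :: pvAFill x t
    else
      match h : t.dropWhile (· == 0) with
      | [] => lv :: List.replicate t.length lv
      | r :: rest =>
        r :: (List.replicate (t.takeWhile (· == 0)).length r ++ (r :: pvAFill r rest))
termination_by s.length
decreasing_by
  · simp
  · have h1 : (t.dropWhile (· == 0)).length ≤ t.length := List.length_dropWhile_le _ _
    rw [h] at h1
    simp at h1 ⊢
    omega

theorem pvFwd_zeros (p : Int) (m : Nat) : pvFwd p (List.replicate m 0) = List.replicate m p := by
  induction m with
  | zero => rfl
  | succ k ih => simp [List.replicate_succ, pvFwd, ih]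

theorem pvBack_zeros (m : Nat) : pvBack 0 (List.replicate m 0) = (0, List.replicate m 0) := by
  induction m with
  | zero => rfl
  | succ k ih => simp [List.replicate_succ, pvBack, ih]

theorem pvBack_zeros_append (zs u : List Int) (hz : ∀ z ∈ zs, z = 0) :
    pvBack 0 (zs ++ u) = ((pvBack 0 u).1, List.replicate zs.length (pvBack 0 u).1 ++ (pvBack 0 u).2) := by
  induction zs with
  | nil => simp
  | cons z t ih =>
    have hz0 : z = 0 := hz z (by simp)
    have ih' := ih (fun x hx => hz x (by simp [hx]))
    simp [pvBack, ih', hz0, List.replicate_succ]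

theorem pvFwd_rep_ne (c : Int) (hc : c ≠ 0) (p : Int) (k : Nat) (u : List Int) :
    pvFwd p (List.replicate k c ++ c :: u) = List.replicate k c ++ c :: pvFwd c u := by
  induction k generalizing p with
  | zero => simp [pvFwd, hc]
  | succ j ih => simp [List.replicate_succ, pvFwd, hc, ih]

theorem all_zero_eq_replicate (t : List Int) (h : ∀ z ∈ t, z = 0) :
    t = List.replicate t.length 0 :=
  List.eq_replicate_length.mpr h

theorem dropWhile_head_ne (t : List Int) (r : Int) (rest : List Int)
    (h : t.dropWhile (· == 0) = r :: rest) : r ≠ 0 := by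
  induction t with
  | nil => simp at h
  | cons x u ih =>
    by_cases hx : x = 0
    · rw [List.dropWhile_cons_of_pos (by simp [hx])] at h; exact ih h
    · rw [List.dropWhile_cons_of_neg (by simp [hx])] at h
      cases h; exact hx

theorem takeWhile_zero_mem (t : List Int) (z : Int) (hz : z ∈ t.takeWhile (· == 0)) : z = 0 := by
  simpa using List.mem_takeWhile_imp hz

theorem pvAFill_core (lv : Int) (s : List Int) : pvAFill lv s = pvFwd lv (pvBack 0 s).2 := by
  induction lv, s using pvAFill.induct with
  | case1 lv => rw [pvAFill]; rfl
  | case2 lv x t hx ih =>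
    rw [pvAFill]
    simp only [if_pos hx]
    have hb : pvBack 0 (x :: t) = (x, x :: (pvBack 0 t).2) := by
      rw [pvBack]; simp [hx]
    rw [hb, pvFwd]
    simp only [if_neg hx]
    rw [ih]
  | case3 lv x t hx h =>
    have hx0 : x = 0 := by simpa using hx
    have hall : ∀ z ∈ t, z = 0 := by
      intro z hz
      have htw : t.takeWhile (· == 0) = t := by
        have h2 := List.takeWhile_append_dropWhile (p := (· == 0)) (l := t)
        rw [h] at h2; simpa using h2
      exact takeWhile_zero_mem t z (by rw [htw]; exact hz)
    have ht : t = List.replicate t.length 0 := all_zero_eq_replicate t hall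
    rw [pvAFill]
    simp only [if_neg hx]
    rw [show (match h : List.dropWhile (fun x => x == 0) t with
    | [] => lv :: List.replicate t.length lv
    | r :: rest => r :: (List.replicate (List.takeWhile (fun x => x == 0) t).length r ++ r :: pvAFill r rest))
      = lv :: List.replicate t.length lv from by
        split
        · rfl
        · rename_i r rest heq; rw [h] at heq; cases heq]
    conv_rhs => rw [hx0, ht]
    have h1 : (0 : Int) :: List.replicate t.length 0 = List.replicate (t.length + 1) 0 := by
      simp [List.replicate_succ]
    rw [h1, pvBack_zeros, pvFwd_zeros]
    simp [List.replicate_succ]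
  | case4 lv x t hx r rest h ih =>
    have hx0 : x = 0 := by simpa using hx
    have hr : r ≠ 0 := dropWhile_head_ne t r rest h
    have hdecomp : t.takeWhile (· == 0) ++ r :: rest = t := by
      have h2 := List.takeWhile_append_dropWhile (p := (· == 0)) (l := t)
      rw [h] at h2; exact h2
    rw [pvAFill]
    simp only [if_neg hx]
    rw [show (match h : List.dropWhile (fun x => x == 0) t with
    | [] => lv :: List.replicate t.length lv
    | r' :: rest' => r' :: (List.replicate (List.takeWhile (fun x => x == 0) t).length r' ++ r' :: pvAFill r' rest'))
      = r :: (List.replicate (List.takeWhile (fun x => x == 0) t).length r ++ r :: pvAFill r rest) from by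
        split
        · rename_i heq; rw [h] at heq; cases heq
        · rename_i r' rest' heq; rw [h] at heq; injection heq with h1 h2; subst h1; subst h2; rfl]
    conv_rhs => rw [hx0, ← hdecomp]
    have hbr : pvBack 0 (r :: rest) = (r, r :: (pvBack 0 rest).2) := by
      rw [pvBack]; simp [hr]
    have hback : pvBack 0 ((0 : Int) :: (t.takeWhile (· == 0) ++ r :: rest))
        = (r, r :: (List.replicate (t.takeWhile (· == 0)).length r ++ (r :: (pvBack 0 rest).2))) := by
      rw [pvBack]
      rw [pvBack_zeros_append _ _ (takeWhile_zero_mem t), hbr]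
      simp
    rw [hback]
    have hfwd : pvFwd lv (r :: (List.replicate (t.takeWhile (· == 0)).length r ++ (r :: (pvBack 0 rest).2)))
        = r :: (List.replicate (t.takeWhile (· == 0)).length r ++ (r :: pvFwd r (pvBack 0 rest).2)) := by
      rw [pvFwd]
      simp only [if_neg hr]
      rw [pvFwd_rep_ne r hr]
    rw [hfwd, ih]

-- unfolding lemmas for pvAFill
theorem pvAFill_nil (lv : Int) : pvAFill lv [] = [] := by rw [pvAFill]

theorem pvAFill_cons_ne (lv x : Int) (t : List Int) (hx : x ≠ 0) :
    pvAFill lv (x :: t) = x :: pvAFill x t := by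
  rw [pvAFill]; simp only [if_pos hx]

theorem pvAFill_cons_zero_none (lv : Int) (t : List Int) (h : t.dropWhile (· == 0) = []) :
    pvAFill lv ((0 : Int) :: t) = lv :: List.replicate t.length lv := by
  rw [pvAFill]
  simp only [ne_eq, not_true_eq_false, if_false, ite_false]
  split
  · rfl
  · rename_i r rest heq; rw [h] at heq; cases heq

theorem pvAFill_cons_zero_some (lv r : Int) (t rest : List Int)
    (h : t.dropWhile (· == 0) = r :: rest) :
    pvAFill lv ((0 : Int) :: t)
      = r :: (List.replicate (t.takeWhile (· == 0)).length r ++ (r :: pvAFill r rest)) := by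
  rw [pvAFill]
  simp only [ne_eq, not_true_eq_false, if_false, ite_false]
  split
  · rename_i heq; rw [h] at heq; cases heq
  · rename_i r' rest' heq; rw [h] at heq
    injection heq with h1 h2; subst h1; subst h2; rfl

theorem pvAFill_rep (c : Int) (m : Nat) : pvAFill c (List.replicate m c) = List.replicate m c := by
  induction m with
  | zero => simp [pvAFill_nil]
  | succ k ih =>
    by_cases hc : c = 0
    · subst hc
      rw [List.replicate_succ, pvAFill_cons_zero_none]
      · simp
      · rw [List.dropWhile_eq_nil_iff]
        intro x hx; simpa using List.eq_of_mem_replicate hx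
    · rw [List.replicate_succ, pvAFill_cons_ne _ _ _ hc, ih]

theorem pvAFill_rep_ne (c : Int) (hc : c ≠ 0) (lv : Int) (k : Nat) (u : List Int) :
    pvAFill lv (List.replicate k c ++ c :: u) = List.replicate k c ++ c :: pvAFill c u := by
  induction k generalizing lv with
  | zero => simp [pvAFill_cons_ne _ _ _ hc]
  | succ j ih => rw [List.replicate_succ, List.cons_append, pvAFill_cons_ne _ _ _ hc, ih]; rfl

-- fold of pySetD over a range writes a replicate block
theorem pvSet_range (v : Int) : ∀ (k : Nat) (a : Int) (rs : List Int), 0 ≤ a → a.toNat + k ≤ rs.length →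
    (PySem.List.pyRange a (a + (k : Int)) 1).foldl (fun acc i => PySem.List.pySetD acc i v) rs
    = rs.take a.toNat ++ (List.replicate k v ++ rs.drop (a.toNat + k)) := by
  intro k
  induction k with
  | zero =>
    intro a rs ha _
    rw [show (a + ((0 : Nat) : Int)) = a by simp, PySem.List.pyRange_one_eq_nil (le_refl a)]
    simp
  | succ k ih =>
    intro a rs ha hlen
    have hcast : (((k : Nat) + 1 : Nat) : Int) = (k : Int) + 1 := by push_cast; ring
    rw [hcast, show a + ((k : Int) + 1) = (a + (k : Int)) + 1 by ring,
      PySem.List.pyRange_one_succ_right (by omega), List.foldl_append, ih a rs ha (by omega)]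
    simp only [List.foldl_cons, List.foldl_nil]
    rw [PySem.List.pySetD_of_nonneg _ _ (by omega)]
    have htn : (a + (k : Int)).toNat = a.toNat + k := by omega
    rw [htn]
    have hlt : a.toNat + k < rs.length := by omega
    have htke : (rs.take a.toNat).length = a.toNat := by
      rw [List.length_take]; omega
    rw [List.drop_eq_getElem_cons hlt]
    rw [List.set_append_right _ _ (by simp [htke])]
    rw [show List.replicate k v ++ rs[a.toNat + k] :: rs.drop (a.toNat + k + 1)
        = (List.replicate k v ++ [rs[a.toNat + k]]) ++ rs.drop (a.toNat + k + 1) by simp]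
    rw [List.set_append_left _ _ (by simp [htke])]
    congr 1
    rw [show a.toNat + k - (rs.take a.toNat).length = k by omega]
    rw [List.set_append_right _ _ (by simp)]
    simp [List.replicate_succ']
    omega

-- the inner scan as a findIdx? over the dropped suffix
theorem pvScan (rs : List Int) : ∀ (k : Nat) (a : Int), 0 ≤ a → a + (k : Int) = (rs.length : Int) →
    (PySem.List.pyRange a (rs.length : Int) 1).find? (fun i => PySem.List.pyGetD rs i 0 != 0)
    = ((rs.drop a.toNat).findIdx? (fun x => x != 0)).map (fun j => a + (j : Int)) := by
  intro k
  induction k with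
  | zero =>
    intro a ha hlen
    rw [PySem.List.pyRange_one_eq_nil (by omega)]
    rw [List.drop_eq_nil_of_le (by omega)]
    simp
  | succ k ih =>
    intro a ha hlen
    rw [PySem.List.pyRange_one_cons (by push_cast at hlen ⊢; omega), List.find?_cons]
    have hlt : a.toNat < rs.length := by omega
    have hget : PySem.List.pyGetD rs a 0 = rs[a.toNat] :=
      PySem.List.pyGetD_eq_getElem rs 0 ha (by omega)
    rw [List.drop_eq_getElem_cons hlt, List.findIdx?_cons]
    by_cases hx : rs[a.toNat] = 0
    · simp only [hget, hx]
      have hih := ih (a + 1) (by omega) (by push_cast at hlen ⊢; omega)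
      rw [show (a + 1).toNat = a.toNat + 1 by omega] at hih
      rw [hih]
      simp only [bne_self_eq_false, if_false, Option.map_map]
      cases h2 : (rs.drop (a.toNat + 1)).findIdx? (fun x => x != 0) <;> simp [Function.comp]
      push_cast; ring
    · have hb : (rs[a.toNat] != 0) = true := by simp [hx]
      simp [hget, hb, hx]
  

theorem findIdx?_dropWhile_nil (t : List Int) (h : t.dropWhile (· == 0) = []) :
    t.findIdx? (fun x => x != 0) = none := by
  rw [List.findIdx?_eq_none_iff]
  intro x hx
  have htw : t.takeWhile (· == 0) = t := by
    have h2 := List.takeWhile_append_dropWhile (p := (· == 0)) (l := t)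
    rw [h] at h2; simpa using h2
  have := takeWhile_zero_mem t x (by rw [htw]; exact hx)
  simp [this]

theorem findIdx?_dropWhile_cons (t : List Int) (r : Int) (rest : List Int)
    (h : t.dropWhile (· == 0) = r :: rest) :
    t.findIdx? (fun x => x != 0) = some (t.takeWhile (· == 0)).length := by
  induction t with
  | nil => simp at h
  | cons x u ih =>
    by_cases hx : x = 0
    · rw [List.dropWhile_cons_of_pos (by simp [hx])] at h
      rw [List.findIdx?_cons]
      simp only [hx]
      rw [ih h]
      rw [List.takeWhile_cons_of_pos (by simp [hx])]
      rfl
    · rw [List.findIdx?_cons]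
      simp [hx]

-- A's main loop (indices ≥ length) computes pvAFill on the suffix
theorem pvALoop (length : Int) : ∀ (m : Nat) (d : Int) (rs : List Int), 0 ≤ d → length ≤ d →
    d + (m : Int) = (rs.length : Int) →
    (PySem.List.pyRange d (rs.length : Int) 1).foldl (pvAStep length) rs
    = rs.take d.toNat ++ pvAFill (PySem.List.pyGetD rs (d - 1) 0) (rs.drop d.toNat) := by
  intro m
  induction m with
  | zero =>
    intro d rs hd hld hlen
    rw [PySem.List.pyRange_one_eq_nil (by omega)]
    rw [List.drop_eq_nil_of_le (by omega), List.take_of_length_le (by omega), pvAFill_nil]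
    simp
  | succ k ih =>
    intro d rs hd hld hlen
    have hdlt : d.toNat < rs.length := by omega
    rw [PySem.List.pyRange_one_cons (by omega), List.foldl_cons]
    have hget : PySem.List.pyGetD rs d 0 = rs[d.toNat] :=
      PySem.List.pyGetD_eq_getElem rs 0 hd (by omega)
    by_cases hx : rs[d.toNat] = 0
    · -- results[d] == 0: A fills a block
      have hstep0 : pvAStep length rs d
          = (if (pvAFindRight rs d).2 ≠ (rs.length : Int) then
              (if PySem.List.pyGetD rs (d-1) 0 = (pvAFindRight rs d).1 then
                pvFill rs d (pvAFindRight rs d).2 (PySem.List.pyGetD rs (d-1) 0)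
              else pvFill rs d (pvAFindRight rs d).2 (pvAFindRight rs d).1)
            else pvFill rs d (pvAFindRight rs d).2 (PySem.List.pyGetD rs (d-1) 0)) := by
        unfold pvAStep
        rw [if_neg (by omega), if_neg (by simp [hget, hx])]
      have hfind : pvAFindRight rs d
          = (match ((rs.drop (d.toNat + 1)).findIdx? (fun x => x != 0)).map
                (fun j => (d + 1) + (j : Int)) with
             | some i => (PySem.List.pyGetD rs i 0, i)
             | none => (-1, (rs.length : Int))) := by
        unfold pvAFindRight
        rw [pvScan rs k (d + 1) (by omega) (by push_cast at hlen ⊢; omega)]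
        rw [show (d + 1).toNat = d.toNat + 1 by omega]
      set s' := rs.drop (d.toNat + 1) with hs'def
      have hs'len : s'.length = k := by simp [hs'def]; omega
      set lv := PySem.List.pyGetD rs (d - 1) 0 with hlvdef
      cases h' : s'.dropWhile (· == 0) with
      | nil =>
        -- no nonzero to the right: fill [d, len) with left
        have hfindn : pvAFindRight rs d = (-1, (rs.length : Int)) := by
          rw [hfind, findIdx?_dropWhile_nil _ h']
          rfl
        rw [hstep0, hfindn]
        rw [if_neg (by simp)]
        simp only
        have hfill : pvFill rs d (rs.length : Int) lv
            = rs.take d.toNat ++ (List.replicate (k + 1) lv ++ []) := by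
          unfold pvFill
          rw [show ((rs.length : Int)) = d + ((k+1 : Nat) : Int) by push_cast at hlen ⊢; omega]
          rw [pvSet_range lv (k+1) d rs hd (by omega)]
          rw [List.drop_eq_nil_of_le (by omega)]
        rw [hfill]
        set rs' := rs.take d.toNat ++ (List.replicate (k + 1) lv ++ []) with hrs'
        have htke : (rs.take d.toNat).length = d.toNat := by rw [List.length_take]; omega
        have hlen' : rs'.length = rs.length := by
          simp [hrs', htke]; omega
        have hih := ih (d + 1) rs' (by omega) (by omega)
            (by rw [hlen']; push_cast at hlen ⊢; omega)
        rw [hlen'] at hih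
        rw [hih]
        rw [show d + 1 - 1 = d by ring, show (d+1).toNat = d.toNat + 1 by omega]
        have h1 : rs'.take (d.toNat + 1) = rs.take d.toNat ++ [lv] := by
          rw [hrs', List.take_append, List.take_of_length_le (by omega), htke]
          congr 1
          rw [show d.toNat + 1 - d.toNat = 1 by omega]
          simp [List.replicate_succ]
        have h2 : rs'.drop (d.toNat + 1) = List.replicate k lv := by
          rw [hrs', List.drop_append, htke]
          rw [List.drop_eq_nil_of_le (by omega)]
          rw [show d.toNat + 1 - d.toNat = 1 by omega]
          simp [List.replicate_succ]
        have h3 : PySem.List.pyGetD rs' d 0 = lv := by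
          rw [PySem.List.pyGetD_of_nonneg _ _ hd, hrs']
          rw [List.getD_eq_getElem?_getD, List.getElem?_append_right (by simp [htke])]
          simp [htke, List.replicate_succ]
        rw [h1, h2, h3, pvAFill_rep]
        -- right side
        rw [List.drop_eq_getElem_cons hdlt]
        simp only [hx]
        rw [← hs'def, pvAFill_cons_zero_none _ _ h', hs'len]
        simp [List.replicate_succ]
      | cons r rest =>
        have hr : r ≠ 0 := dropWhile_head_ne s' r rest h'
        set zs := s'.takeWhile (· == 0) with hzsdef
        have hsplit : zs ++ r :: rest = s' := by
          rw [hzsdef, ← h']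
          exact List.takeWhile_append_dropWhile
        have hzall : ∀ z ∈ zs, z = 0 := fun z hz => takeWhile_zero_mem s' z hz
        have hklen : zs.length + 1 + rest.length = k := by
          have := congrArg List.length hsplit
          simp at this; omega
        have hfI : ((d + 1) + ((zs.length : Nat) : Int)).toNat = d.toNat + 1 + zs.length := by omega
        have hgetr : PySem.List.pyGetD rs ((d + 1) + ((zs.length : Nat) : Int)) 0 = r := by
          rw [PySem.List.pyGetD_of_nonneg _ _ (by omega), hfI]
          have e1 : rs.getD (d.toNat + 1 + zs.length) 0 = s'.getD zs.length 0 := by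
            rw [hs'def, List.getD_eq_getElem?_getD, List.getD_eq_getElem?_getD,
              List.getElem?_drop]
          have e2 : s'.getD zs.length 0 = r := by
            rw [← hsplit, List.getD_eq_getElem?_getD,
              List.getElem?_append_right (by omega)]
            simp
          rw [e1, e2]
        have hfindr : pvAFindRight rs d = (r, (d + 1) + ((zs.length : Nat) : Int)) := by
          rw [hfind, findIdx?_dropWhile_cons _ _ _ h', ← hzsdef]
          show (PySem.List.pyGetD rs ((d + 1) + ((zs.length : Nat) : Int)) 0, (d + 1) + ((zs.length : Nat) : Int)) = _
          rw [hgetr]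
        rw [hstep0, hfindr]
        simp only
        have hfillr : pvFill rs d ((d + 1) + ((zs.length : Nat) : Int)) r
            = rs.take d.toNat ++ (List.replicate (1 + zs.length) r ++ (r :: rest)) := by
          unfold pvFill
          rw [show (d + 1) + ((zs.length : Nat) : Int) = d + ((1 + zs.length : Nat) : Int) by push_cast; ring]
          rw [pvSet_range r (1 + zs.length) d rs hd (by omega)]
          congr 2
          rw [show d.toNat + (1 + zs.length) = (d.toNat + 1) + zs.length by omega]
          rw [← List.drop_drop, ← hs'def, ← hsplit]
          simp
        have hflagne : ((d + 1) + ((zs.length : Nat) : Int)) ≠ (rs.length : Int) := by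
          push_cast at hlen ⊢; omega
        rw [if_pos hflagne]
        have hboth : (if lv = r then pvFill rs d ((d + 1) + ((zs.length : Nat) : Int)) lv
            else pvFill rs d ((d + 1) + ((zs.length : Nat) : Int)) r)
            = rs.take d.toNat ++ (List.replicate (1 + zs.length) r ++ (r :: rest)) := by
          split_ifs with he
          · rw [he, hfillr]
          · rw [hfillr]
        rw [hboth]
        set rs' := rs.take d.toNat ++ (List.replicate (1 + zs.length) r ++ (r :: rest)) with hrs'
        have htke : (rs.take d.toNat).length = d.toNat := by rw [List.length_take]; omega
        have hlen' : rs'.length = rs.length := by simp [hrs', htke]; omega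
        have hih := ih (d + 1) rs' (by omega) (by omega)
            (by rw [hlen']; push_cast at hlen ⊢; omega)
        rw [hlen'] at hih
        rw [hih]
        rw [show d + 1 - 1 = d by ring, show (d+1).toNat = d.toNat + 1 by omega]
        have h1 : rs'.take (d.toNat + 1) = rs.take d.toNat ++ [r] := by
          rw [hrs', List.take_append, List.take_of_length_le (by omega), htke]
          congr 1
          rw [show d.toNat + 1 - d.toNat = 1 by omega]
          rw [show (1 + zs.length) = zs.length + 1 by omega]
          simp [List.replicate_succ, List.take_append]
        have h2 : rs'.drop (d.toNat + 1) = List.replicate zs.length r ++ (r :: rest) := by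
          rw [hrs', List.drop_append, htke]
          rw [List.drop_eq_nil_of_le (by omega)]
          rw [show d.toNat + 1 - d.toNat = 1 by omega]
          rw [show (1 + zs.length) = zs.length + 1 by omega]
          simp [List.replicate_succ, List.drop_append]
        have h3 : PySem.List.pyGetD rs' d 0 = r := by
          rw [PySem.List.pyGetD_of_nonneg _ _ hd, hrs']
          rw [List.getD_eq_getElem?_getD, List.getElem?_append_right (by simp [htke])]
          rw [show (1 + zs.length) = zs.length + 1 by omega]
          simp [htke, List.replicate_succ]
        rw [h1, h2, h3, pvAFill_rep_ne r hr]
        -- right side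
        rw [List.drop_eq_getElem_cons hdlt]
        simp only [hx]
        rw [← hs'def, pvAFill_cons_zero_some _ _ _ _ h', ← hzsdef]
        simp
    · -- results[d] != 0: skip
      have hstep : pvAStep length rs d = rs := by
        unfold pvAStep
        rw [if_neg (by omega), if_pos (by simp [hget, hx])]
      rw [hstep]
      have hih := ih (d + 1) rs (by omega) (by omega) (by push_cast at hlen ⊢; omega)
      rw [hih]
      rw [show d + 1 - 1 = d by ring, show (d+1).toNat = d.toNat + 1 by omega]
      conv_rhs => rw [List.drop_eq_getElem_cons hdlt]
      rw [pvAFill_cons_ne _ _ _ hx, hget]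
      have htk : rs.take (d.toNat + 1) = rs.take d.toNat ++ [rs[d.toNat]] := by
        rw [List.take_add_one, List.getElem?_eq_getElem hdlt]
        rfl
      rw [htk, List.append_assoc]
      rfl

-- A's prefix loop overwrites [0, L) with results[length]
theorem pvAPrefix (length : Int) (rs : List Int) (hlt : length < (rs.length : Int)) :
    ∀ (L : Nat), (L : Int) ≤ length →
    (PySem.List.pyRange 0 (L : Int) 1).foldl (pvAStep length) rs
    = List.replicate L (PySem.List.pyGetD rs length 0) ++ rs.drop L := by
  intro L
  induction L with
  | zero =>
    intro _
    rw [show ((0 : Nat) : Int) = (0 : Int) by simp, PySem.List.pyRange_one_eq_nil (le_refl 0)]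
    simp
  | succ L ih =>
    intro hL
    have hL' : (L : Int) ≤ length := by push_cast at hL; omega
    have hLlt : L < rs.length := by omega
    rw [show (((L : Nat) + 1 : Nat) : Int) = (L : Int) + 1 by push_cast; ring]
    rw [PySem.List.pyRange_one_succ_right (by positivity), List.foldl_append, ih hL']
    simp only [List.foldl_cons, List.foldl_nil]
    set v := PySem.List.pyGetD rs length 0 with hv
    set st := List.replicate L v ++ rs.drop L with hst
    have hstlen : st.length = rs.length := by simp [hst]; omega
    have hgv : PySem.List.pyGetD st length 0 = v := by
      rw [PySem.List.pyGetD_of_nonneg _ _ (by omega), hst]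
      rw [List.getD_eq_getElem?_getD, List.getElem?_append_right (by simp; omega)]
      rw [List.getElem?_drop]
      rw [show L + (length.toNat - (List.replicate L v).length) = length.toNat by simp; omega]
      rw [hv, PySem.List.pyGetD_of_nonneg _ _ (by omega), List.getD_eq_getElem?_getD]
    have hstep : pvAStep length st (L : Int) = List.replicate (L+1) v ++ rs.drop (L+1) := by
      unfold pvAStep
      rw [if_pos (by constructor <;> [positivity; omega])]
      rw [hgv, PySem.List.pySetD_of_nonneg _ _ (by positivity)]
      rw [show ((L : Int)).toNat = L by omega]
      rw [hst, List.set_append_right _ _ (by simp)]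
      have hset : (List.drop L rs).set (L - (List.replicate L v).length) v
          = v :: List.drop (L + 1) rs := by
        rw [show L - (List.replicate L v).length = 0 by simp]
        rw [List.drop_eq_getElem_cons hLlt]
        rfl
      rw [hset, List.replicate_succ']
      simp
    rw [hstep]

-- B's backward loop is pvBack
theorem pvBBack (s : List Int) : ∀ (r0 : Int) (acc : List Int),
    s.reverse.foldl (fun (q : Int × List Int) x =>
      let r := if x ≠ 0 then x else q.1
      (r, q.2 ++ [r])) (r0, acc)
    = ((pvBack r0 s).1, acc ++ (pvBack r0 s).2.reverse) := by
  induction s with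
  | nil => simp [pvBack]
  | cons x t ih =>
    intro r0 acc
    rw [List.reverse_cons, List.foldl_append, ih]
    rw [show pvBack r0 (x :: t) = (if x ≠ 0 then x else (pvBack r0 t).1,
        (if x ≠ 0 then x else (pvBack r0 t).1) :: (pvBack r0 t).2) from by
      rw [pvBack]; split_ifs <;> rfl]
    simp

-- B's forward loop is pvFwd
theorem pvBFwd (s : List Int) : ∀ (prev : Int) (acc : List Int),
    (s.foldl (fun (q : Int × List Int) x =>
      if x = 0 then (q.1, q.2 ++ [q.1]) else (x, q.2 ++ [x])) (prev, acc)).2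
    = acc ++ pvFwd prev s := by
  induction s with
  | nil => simp [pvFwd]
  | cons x t ih =>
    intro prev acc
    rw [List.foldl_cons]
    by_cases hx : x = 0
    · simp only [hx, if_pos rfl]
      rw [ih, pvFwd]
      simp
    · simp only [if_neg hx]
      rw [ih, pvFwd]
      simp [hx]

theorem main_equiv (rs : List Int) (length : Int)
    (hpre : rs = [] ∨ length < (rs.length : Int)) :
    correct_results rs length = correct_results_alt rs length := by
  rcases hpre with hnil | hlt
  · subst hnil
    unfold correct_results correct_results_alt
    rw [show ((([] : List Int)).length : Int) = 0 by simp,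
      PySem.List.pyRange_one_eq_nil (le_refl 0)]
    simp
  · by_cases hnil2 : rs = []
    · subst hnil2
      unfold correct_results correct_results_alt
      rw [show ((([] : List Int)).length : Int) = 0 by simp,
        PySem.List.pyRange_one_eq_nil (le_refl 0)]
      simp
    · have hne : rs.length ≠ 0 := by simpa using hnil2
      by_cases hpos : 0 < length
      · -- positive length < len: prefix overwrite then the fill
        set v := PySem.List.pyGetD rs length 0 with hv
        set rs1 := List.replicate length.toNat v ++ rs.drop length.toNat with hrs1
        have hlen1 : rs1.length = rs.length := by simp [hrs1]; omega
        -- A side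
        unfold correct_results
        rw [PySem.List.pyRange_one_append 0 length (rs.length : Int) (by omega) (by omega)]
        rw [List.foldl_append]
        have hpr := pvAPrefix length rs hlt length.toNat (by omega)
        rw [show ((length.toNat : Nat) : Int) = length by omega] at hpr
        rw [hpr, ← hv, ← hrs1]
        have hloop := pvALoop length (rs.length - length.toNat) length rs1 (by omega)
          (le_refl length) (by rw [hlen1]; push_cast; omega)
        rw [hlen1] at hloop
        rw [hloop]
        -- B side
        unfold correct_results_alt
        rw [if_neg hne]
        rw [if_pos hpos]
        simp only
        have hfoldpre : (PySem.List.pyRange 0 length 1).foldl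
            (fun acc d => PySem.List.pySetD acc d (PySem.List.pyGetD rs length 0)) rs = rs1 := by
          have hsr := pvSet_range v length.toNat 0 rs (le_refl 0) (by omega)
          rw [show (0 : Int) + ((length.toNat : Nat) : Int) = length by omega] at hsr
          rw [hv] at hsr
          rw [hsr, hrs1, hv]
          simp
        rw [hfoldpre]
        rw [PySem.List.slice_from _ (by omega), PySem.List.slice_to _ (by omega)]
        rw [pvBBack, pvBFwd]
        rw [pvAFill_core]
        simp
      · -- length ≤ 0: no prefix, fill the whole list
        unfold correct_results
        have hloop := pvALoop length rs.length 0 rs (le_refl 0) (by omega) (by omega)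
        rw [hloop]
        unfold correct_results_alt
        rw [if_neg hne, if_neg hpos]
        simp only
        rw [PySem.List.slice_from _ (le_refl 0), PySem.List.slice_to _ (le_refl 0)]
        rw [pvBBack, pvBFwd]
        rw [pvAFill_core]
        simp

-- ===== VERDICT (by name: the statement is the Claim_ definition above) =====
theorem correct_results_spec : Claim_equal_correct_results := by
  intro rs length _ hpre
  unfold Spec_correct_results
  exact main_equiv rs length hpre
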